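-- pv_equiv track=rewrite | github.com/Rafael-Sapienza/computacao | programas/1Semestre/XI_Maratona_Unb_Programacao/problema_G_v0.py | calculateNumberOfSwaps
-- ===== SOURCE A (Python) =====
-- def isItPossibleToMakeString(listaDeStrings):
--     result = True
--     for i in range(len(listaDeStrings)):
--         for j in range(len(listaDeStrings)):
--                 if i != j and listaDeStrings[i][0] == listaDeStrings[j][0]:
--                     if listaDeStrings[i][1] != listaDeStrings[j][1]:
--                         result = False
--     return result
--
-- def calculateNumberOfSwaps(listaDeStrings):
--     if isItPossibleToMakeString(listaDeStrings):
--         x = 0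
--         for i in range(len(listaDeStrings)):
--             if listaDeStrings[i][0] != listaDeStrings[i][1]:
--                 x += 1
--         return x
--     else:
--         return -1
-- ===== SOURCE B (Python) =====
-- def calculateNumberOfSwaps(listaDeStrings):
--     required = {}
--     ok = True
--     for s in listaDeStrings:
--         if required.setdefault(s[0], s[1:2]) != s[1:2]:
--             ok = False
--     if not ok:
--         return -1
--     return sum(1 for s in listaDeStrings if s[0] != s[1])
-- ===== Notes on version B (the rewrite author's own statement) =====
-- stated objective: faster
-- what changed: Replaces A's quadratic all-pairs consistency scan with a single pass that records each first character's required s[1:2] in a dict and latches a conflict flag.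
import Mathlib
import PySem

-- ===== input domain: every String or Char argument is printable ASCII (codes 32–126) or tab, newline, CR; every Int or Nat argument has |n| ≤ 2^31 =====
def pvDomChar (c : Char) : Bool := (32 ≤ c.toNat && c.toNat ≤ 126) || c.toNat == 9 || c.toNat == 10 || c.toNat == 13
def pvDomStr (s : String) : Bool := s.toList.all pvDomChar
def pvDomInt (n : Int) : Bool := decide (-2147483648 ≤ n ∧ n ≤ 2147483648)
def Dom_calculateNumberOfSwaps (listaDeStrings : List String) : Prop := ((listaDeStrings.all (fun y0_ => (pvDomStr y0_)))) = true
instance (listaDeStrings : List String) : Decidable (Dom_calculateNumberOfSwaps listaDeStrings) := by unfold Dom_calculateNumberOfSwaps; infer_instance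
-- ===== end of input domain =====

-- B replaces A's quadratic all-pairs consistency scan with a one-pass dict mapping each first
-- character to its required s[1:2]; the return values are proved equal on Pre_ (where A returns).

-- s[i] for 0 ≤ i < len(s); used only where Pre_ guarantees the index is in range
def pvC (s : String) (i : Nat) : Char := (PySem.Str.pyGet? s (i : Int)).getD ' '
-- s[1:2] (a slice never raises)
def pvS12 (s : String) : List Char := PySem.List.slice s.toList (some 1) (some 2)

-- ===== PORT A =====
def calculateNumberOfSwaps (listaDeStrings : List String) : Int :=
  let n := listaDeStrings.length
  -- isItPossibleToMakeString: nested loops over all index pairs, latching result to false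
  let result := (List.range n).foldl (fun res i =>
      (List.range n).foldl (fun res j =>
        if i ≠ j ∧ pvC (listaDeStrings.getD i "") 0 = pvC (listaDeStrings.getD j "") 0 then
          if pvC (listaDeStrings.getD i "") 1 ≠ pvC (listaDeStrings.getD j "") 1 then false else res
        else res) res) true
  if result then
    (List.range n).foldl (fun x i =>
      if pvC (listaDeStrings.getD i "") 0 ≠ pvC (listaDeStrings.getD i "") 1 then x + 1 else x) (0 : Int)
  else -1

-- ===== PORT B =====
-- the for-loop of Source B: required.setdefault(s[0], s[1:2]) compared with s[1:2], latching ok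
def pvBLoop (d : PySem.Dict Char (List Char)) (ok : Bool) : List String → Bool
  | [] => ok
  | s :: rest =>
    let v := (d.get? (pvC s 0)).getD (pvS12 s)      -- value setdefault returns
    let d' := d.setdefault (pvC s 0) (pvS12 s)
    pvBLoop d' (if v ≠ pvS12 s then false else ok) rest

def calculateNumberOfSwaps_alt (listaDeStrings : List String) : Int :=
  if pvBLoop PySem.Dict.empty true listaDeStrings then
    -- sum(1 for s in listaDeStrings if s[0] != s[1])
    (listaDeStrings.map (fun s => if pvC s 0 ≠ pvC s 1 then (1 : Int) else 0)).sum
  else -1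

-- ===== PRECONDITION & SPEC =====
-- Pre_ excludes exactly the inputs on which A raises IndexError (a string too short at a position A
-- actually indexes: an empty string it compares, a length-1 string sharing its first character with
-- another entry, or — when the pairs are consistent — any string shorter than 2); A returns on all
-- inputs Pre_ admits and raises on all it excludes.
def Pre_calculateNumberOfSwaps (listaDeStrings : List String) : Prop :=
  (∀ s ∈ listaDeStrings, 1 ≤ s.toList.length) ∧
  (∀ s ∈ listaDeStrings, s.toList.length < 2 →
      listaDeStrings.count s ≤ 1 ∧ ∀ t ∈ listaDeStrings, t ≠ s → pvC t 0 ≠ pvC s 0) ∧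
  ((∀ s ∈ listaDeStrings, ∀ t ∈ listaDeStrings, pvC s 0 = pvC t 0 → pvC s 1 = pvC t 1) →
      ∀ s ∈ listaDeStrings, 2 ≤ s.toList.length)
instance (listaDeStrings : List String) : Decidable (Pre_calculateNumberOfSwaps listaDeStrings) := by
  unfold Pre_calculateNumberOfSwaps; infer_instance
def pvWitness_calculateNumberOfSwaps : List String := (["ab", "cd"])

def Spec_calculateNumberOfSwaps (listaDeStrings : List String) (out : Int) : Prop := out = calculateNumberOfSwaps_alt listaDeStrings
instance (listaDeStrings : List String) (out : Int) : Decidable (Spec_calculateNumberOfSwaps listaDeStrings out) := by unfold Spec_calculateNumberOfSwaps; infer_instance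

-- ===== CLAIM (what is proved, stated in full; the proofs are below) =====
def Claim_equal_calculateNumberOfSwaps : Prop := ∀ (listaDeStrings : List String), Dom_calculateNumberOfSwaps listaDeStrings → Pre_calculateNumberOfSwaps listaDeStrings → Spec_calculateNumberOfSwaps listaDeStrings (calculateNumberOfSwaps listaDeStrings)

-- ===== LEMMAS AND PROOFS =====

-- the "pairwise consistent" property (on second characters) A's check decides
def pvConsistent (l : List String) : Prop :=
  ∀ s ∈ l, ∀ t ∈ l, pvC s 0 = pvC t 0 → pvC s 1 = pvC t 1

-- the slice-based consistency B's pass decides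
def pvSConsistent (l : List String) : Prop :=
  ∀ s ∈ l, ∀ t ∈ l, pvC s 0 = pvC t 0 → pvS12 s = pvS12 t

lemma foldl_latch {α : Type} (p : α → Prop) [DecidablePred p] :
    ∀ (L : List α) (b : Bool),
      L.foldl (fun r x => if p x then false else r) b = (b && L.all (fun x => !decide (p x))) := by
  intro L
  induction L with
  | nil => simp
  | cons x t ih =>
    intro b
    simp only [List.foldl_cons, List.all_cons, ih]
    by_cases h : p x <;> simp [h]

lemma foldl_and {α : Type} (q : α → Bool) :
    ∀ (L : List α) (b : Bool), L.foldl (fun r x => r && q x) b = (b && L.all q) := by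
  intro L
  induction L with
  | nil => simp
  | cons x t ih =>
    intro b
    simp only [List.foldl_cons, List.all_cons, ih, Bool.and_assoc]

lemma foldl_range_getD {α β : Type} (f : β → α → β) (dflt : α) :
    ∀ (l : List α) (b : β),
      (List.range l.length).foldl (fun acc i => f acc (l.getD i dflt)) b = l.foldl f b := by
  intro l
  induction l with
  | nil => simp
  | cons s t ih =>
    intro b
    rw [List.length_cons, List.range_succ_eq_map]
    simp only [List.foldl_cons, List.foldl_map, List.getD_cons_zero, List.getD_cons_succ]
    exact ih (f b s)

-- A's nested index loops decide pvConsistent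
lemma portA_check (l : List String) :
    ((List.range l.length).foldl (fun res i =>
      (List.range l.length).foldl (fun res j =>
        if i ≠ j ∧ pvC (l.getD i "") 0 = pvC (l.getD j "") 0 then
          if pvC (l.getD i "") 1 ≠ pvC (l.getD j "") 1 then false else res
        else res) res) true = true) ↔ pvConsistent l := by
  have hbody : ∀ (i j : ℕ) (res : Bool),
      (if i ≠ j ∧ pvC (l.getD i "") 0 = pvC (l.getD j "") 0 then
        if pvC (l.getD i "") 1 ≠ pvC (l.getD j "") 1 then false else res
      else res)
      = (if (i ≠ j ∧ pvC (l.getD i "") 0 = pvC (l.getD j "") 0 ∧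
             pvC (l.getD i "") 1 ≠ pvC (l.getD j "") 1) then false else res) := by
    intro i j res
    split_ifs with h1 h2 h3 h3 <;> tauto
  have hinner : ∀ (i : ℕ) (res : Bool),
      (List.range l.length).foldl (fun res j =>
        if i ≠ j ∧ pvC (l.getD i "") 0 = pvC (l.getD j "") 0 then
          if pvC (l.getD i "") 1 ≠ pvC (l.getD j "") 1 then false else res
        else res) res
      = (res && (List.range l.length).all (fun j =>
          !decide (i ≠ j ∧ pvC (l.getD i "") 0 = pvC (l.getD j "") 0 ∧
             pvC (l.getD i "") 1 ≠ pvC (l.getD j "") 1))) := by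
    intro i res
    rw [show (fun res j =>
        if i ≠ j ∧ pvC (l.getD i "") 0 = pvC (l.getD j "") 0 then
          if pvC (l.getD i "") 1 ≠ pvC (l.getD j "") 1 then false else res
        else res)
      = (fun res j =>
        if (i ≠ j ∧ pvC (l.getD i "") 0 = pvC (l.getD j "") 0 ∧
             pvC (l.getD i "") 1 ≠ pvC (l.getD j "") 1) then false else res) from
      funext fun res => funext fun j => hbody i j res]
    exact foldl_latch _ _ res
  simp only [hinner]
  rw [foldl_and]
  simp only [Bool.true_and, List.all_eq_true, List.mem_range, Bool.not_eq_eq_eq_not,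
    Bool.not_true, decide_eq_false_iff_not, not_and, not_not]
  constructor
  · intro h s hs t ht h0
    obtain ⟨i, hi, rfl⟩ := List.getElem_of_mem hs
    obtain ⟨j, hj, rfl⟩ := List.getElem_of_mem ht
    by_cases hij : i = j
    · subst hij; rfl
    · have := h i hi j hj hij
      rw [List.getD_eq_getElem?_getD, List.getElem?_eq_getElem hi,
          List.getD_eq_getElem?_getD, List.getElem?_eq_getElem hj] at this
      exact this h0
  · intro h i hi j hj _ h0
    have hmi : l.getD i "" = l[i] := by
      rw [List.getD_eq_getElem?_getD, List.getElem?_eq_getElem hi]; rfl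
    have hmj : l.getD j "" = l[j] := by
      rw [List.getD_eq_getElem?_getD, List.getElem?_eq_getElem hj]; rfl
    rw [hmi, hmj] at h0 ⊢
    exact h _ (List.getElem_mem hi) _ (List.getElem_mem hj) h0

lemma pvBLoop_false : ∀ (l : List String) (d : PySem.Dict Char (List Char)),
    pvBLoop d false l = false := by
  intro l
  induction l with
  | nil => intro d; rfl
  | cons s rest ih =>
    intro d
    simp only [pvBLoop]
    split_ifs <;> exact ih _

-- B's one-pass setdefault check decides pvSConsistent relative to what the dict already records
lemma pvBLoop_iff : ∀ (l : List String) (d : PySem.Dict Char (List Char)),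
    pvBLoop d true l = true ↔
      (pvSConsistent l ∧ ∀ s ∈ l, ∀ v, d.get? (pvC s 0) = some v → v = pvS12 s) := by
  intro l
  induction l with
  | nil => intro d; simp [pvBLoop, pvSConsistent]
  | cons s rest ih =>
    intro d
    cases hd : d.get? (pvC s 0) with
    | some v =>
      have hcont : d.contains (pvC s 0) = true := by
        rw [PySem.Dict.contains_eq_isSome_get?, hd]; rfl
      simp only [pvBLoop, hd, Option.getD_some, PySem.Dict.setdefault_of_contains d (pvS12 s) hcont]
      by_cases hv : v = pvS12 s
      · subst hv
        rw [if_neg (by simp), ih]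
        constructor
        · rintro ⟨hc, hcomp⟩
          constructor
          · intro a ha b hb h0
            rcases List.mem_cons.1 ha with ha | ha
            · rcases List.mem_cons.1 hb with hb | hb
              · rw [ha, hb]
              · rw [ha] at h0 ⊢
                exact hcomp b hb _ (by rw [← h0]; exact hd)
            · rcases List.mem_cons.1 hb with hb | hb
              · rw [hb] at h0 ⊢
                exact (hcomp a ha _ (by rw [h0]; exact hd)).symm
              · exact hc a ha b hb h0
          · intro a ha w hw
            rcases List.mem_cons.1 ha with ha | ha
            · rw [ha] at hw ⊢
              rw [hd] at hw
              exact (Option.some.inj hw).symm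
            · exact hcomp a ha w hw
        · rintro ⟨hc, hcomp⟩
          exact ⟨fun a ha b hb => hc a (List.mem_cons_of_mem _ ha) b (List.mem_cons_of_mem _ hb),
                 fun a ha => hcomp a (List.mem_cons_of_mem _ ha)⟩
      · rw [if_pos (by exact hv), pvBLoop_false]
        simp only [Bool.false_eq_true, false_iff]
        rintro ⟨-, hcomp⟩
        exact hv (hcomp s List.mem_cons_self v hd)
    | none =>
      have hcont : d.contains (pvC s 0) = false := by
        rw [PySem.Dict.contains_eq_isSome_get?, hd]; rfl
      have hstep : pvBLoop d true (s :: rest)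
          = pvBLoop (d.insert (pvC s 0) (pvS12 s)) true rest := by
        simp only [pvBLoop, hd, Option.getD_none,
          PySem.Dict.setdefault_of_not_contains d (pvS12 s) hcont]
        rw [if_neg (by simp)]
      rw [hstep, ih]
      constructor
      · rintro ⟨hc, hcomp⟩
        have hST : ∀ t ∈ rest, pvC s 0 = pvC t 0 → pvS12 s = pvS12 t := by
          intro t ht h0
          refine hcomp t ht (pvS12 s) ?_
          rw [PySem.Dict.get?_insert, if_pos h0.symm]
        constructor
        · intro a ha b hb h0
          rcases List.mem_cons.1 ha with ha | ha
          · rcases List.mem_cons.1 hb with hb | hb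
            · rw [ha, hb]
            · rw [ha] at h0 ⊢; exact hST b hb h0
          · rcases List.mem_cons.1 hb with hb | hb
            · rw [hb] at h0 ⊢; exact (hST a ha h0.symm).symm
            · exact hc a ha b hb h0
        · intro a ha w hw
          rcases List.mem_cons.1 ha with ha | ha
          · rw [ha, hd] at hw; exact absurd hw (by simp)
          · by_cases h0 : pvC a 0 = pvC s 0
            · rw [h0, hd] at hw; exact absurd hw (by simp)
            · refine hcomp a ha w ?_
              rw [PySem.Dict.get?_insert, if_neg h0]; exact hw
      · rintro ⟨hc, hcomp⟩
        refine ⟨fun a ha b hb => hc a (List.mem_cons_of_mem _ ha) b (List.mem_cons_of_mem _ hb), ?_⟩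
        intro a ha w hw
        rw [PySem.Dict.get?_insert] at hw
        by_cases h0 : pvC a 0 = pvC s 0
        · rw [if_pos h0] at hw
          rw [← Option.some.inj hw]
          exact hc s List.mem_cons_self a (List.mem_cons_of_mem _ ha) h0.symm
        · rw [if_neg h0] at hw
          exact hcomp a (List.mem_cons_of_mem _ ha) w hw

-- s[1:2] of a string with ≥ 2 characters is its second character
lemma pvS12_of_long (s : String) (h : 2 ≤ s.toList.length) : pvS12 s = [pvC s 1] := by
  unfold pvS12 pvC
  match hm : s.toList, h with
  | a :: b :: rest, _ =>
    simp [PySem.List.slice_toNat, hm]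

-- under clause 2 of Pre_, two members sharing a first character are equal or both of length ≥ 2
lemma pair_long (l : List String)
    (h2 : ∀ s ∈ l, s.toList.length < 2 →
      l.count s ≤ 1 ∧ ∀ t ∈ l, t ≠ s → pvC t 0 ≠ pvC s 0)
    {s t : String} (hs : s ∈ l) (ht : t ∈ l) (h0 : pvC s 0 = pvC t 0) :
    s = t ∨ (2 ≤ s.toList.length ∧ 2 ≤ t.toList.length) := by
  by_cases hst : s = t
  · exact Or.inl hst
  · right
    constructor
    · by_contra hlen
      exact (h2 s hs (by omega)).2 t ht (Ne.symm hst) h0.symm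
    · by_contra hlen
      exact (h2 t ht (by omega)).2 s hs hst h0
lemma consistent_iff (l : List String)
    (h2 : ∀ s ∈ l, s.toList.length < 2 →
      l.count s ≤ 1 ∧ ∀ t ∈ l, t ≠ s → pvC t 0 ≠ pvC s 0) :
    pvSConsistent l ↔ pvConsistent l := by
  constructor
  · intro h s hs t ht h0
    rcases pair_long l h2 hs ht h0 with rfl | ⟨ls, lt⟩
    · rfl
    · have := h s hs t ht h0
      rw [pvS12_of_long s ls, pvS12_of_long t lt] at this
      exact List.singleton_inj.1 this
  · intro h s hs t ht h0
    rcases pair_long l h2 hs ht h0 with rfl | ⟨ls, lt⟩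
    · rfl
    · rw [pvS12_of_long s ls, pvS12_of_long t lt, h s hs t ht h0]

-- ===== VERDICT (by name: the statement is the Claim_ definition above) =====
theorem calculateNumberOfSwaps_spec : Claim_equal_calculateNumberOfSwaps := by
  intro l _ hpre
  obtain ⟨-, h2, -⟩ := hpre
  show calculateNumberOfSwaps l = calculateNumberOfSwaps_alt l
  simp only [calculateNumberOfSwaps, calculateNumberOfSwaps_alt]
  have hchk : ((List.range l.length).foldl (fun res i =>
      (List.range l.length).foldl (fun res j =>
        if i ≠ j ∧ pvC (l.getD i "") 0 = pvC (l.getD j "") 0 then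
          if pvC (l.getD i "") 1 ≠ pvC (l.getD j "") 1 then false else res
        else res) res) true)
      = pvBLoop PySem.Dict.empty true l := by
    rw [Bool.eq_iff_iff, portA_check, pvBLoop_iff, ← consistent_iff l h2]
    constructor
    · intro h
      exact ⟨h, by intro s hs v hv; simp [PySem.Dict.get?, PySem.Dict.empty] at hv⟩
    · exact fun h => h.1
  rw [hchk]
  rcases pvBLoop PySem.Dict.empty true l with _ | _
  · rfl
  · simp only [if_true]
    rw [foldl_range_getD (fun x s => if pvC s 0 ≠ pvC s 1 then x + 1 else x) "" l (0 : Int)]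
    calc l.foldl (fun x s => if pvC s 0 ≠ pvC s 1 then x + 1 else x) (0 : Int)
        = 0 + (l.countP (fun s => decide (pvC s 0 ≠ pvC s 1)) : Int) := by
          simpa using PySem.List.foldl_count_if (fun s => decide (pvC s 0 ≠ pvC s 1)) l 0
      _ = (l.map fun s => if pvC s 0 ≠ pvC s 1 then (1 : Int) else 0).sum := by
          simpa using (PySem.List.sum_map_ite_one_zero (fun s => decide (pvC s 0 ≠ pvC s 1)) l).symm
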